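-- pv_equiv track=rewrite | github.com/Rblea97/password-security-toolkit | src/securepass/core/entropy.py | get_character_pool_size
-- ===== SOURCE A (Python) =====
-- import string
--
-- def get_character_pool_size(password: str) -> int:
--     """
--     Detect the character pool size used in a password.
--
--     Determines which character sets are present in the password:
--     - Lowercase letters: 26 characters
--     - Uppercase letters: 26 characters
--     - Digits: 10 characters
--     - Symbols: 32 characters (standard ASCII punctuation)
--
--     Args:
--         password: The password to analyze
--
--     Returns:
--         Total size of the character pool (sum of active character sets)
--
--     Examples:
--         >>> get_character_pool_size("password")
--         26  # Only lowercase
--         >>> get_character_pool_size("Password123!")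
--         94  # All character types
--     """
--     if not password:
--         return 0
--
--     pool_size = 0
--
--     # Check for lowercase letters
--     if any(c in string.ascii_lowercase for c in password):
--         pool_size += 26
--
--     # Check for uppercase letters
--     if any(c in string.ascii_uppercase for c in password):
--         pool_size += 26
--
--     # Check for digits
--     if any(c in string.digits for c in password):
--         pool_size += 10
--
--     # Check for symbols (punctuation and special characters)
--     if any(c in string.punctuation for c in password):
--         pool_size += 32
--
--     return pool_size
-- ===== SOURCE B (Python) =====
-- import string
--
--
-- def get_character_pool_size(password: str) -> int:
--     # Single pass with four flags, stopping early once all categories are seen.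
--     lo = up = di = pu = False
--     for c in password:
--         if c in string.ascii_lowercase:
--             lo = True
--         if c in string.ascii_uppercase:
--             up = True
--         if c in string.digits:
--             di = True
--         if c in string.punctuation:
--             pu = True
--         if lo and up and di and pu:
--             break
--     return 26 * lo + 26 * up + 10 * di + 32 * pu
-- ===== Notes on version B (the rewrite author's own statement) =====
-- stated objective: alternative
-- what changed: Replaces A's four whole-string any() scans with a single pass keeping four seen-flags and breaking out early once every category has been seen; the pool size is then computed arithmetically from the flags (empty input yields 0 with no special case).
import Mathlib
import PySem

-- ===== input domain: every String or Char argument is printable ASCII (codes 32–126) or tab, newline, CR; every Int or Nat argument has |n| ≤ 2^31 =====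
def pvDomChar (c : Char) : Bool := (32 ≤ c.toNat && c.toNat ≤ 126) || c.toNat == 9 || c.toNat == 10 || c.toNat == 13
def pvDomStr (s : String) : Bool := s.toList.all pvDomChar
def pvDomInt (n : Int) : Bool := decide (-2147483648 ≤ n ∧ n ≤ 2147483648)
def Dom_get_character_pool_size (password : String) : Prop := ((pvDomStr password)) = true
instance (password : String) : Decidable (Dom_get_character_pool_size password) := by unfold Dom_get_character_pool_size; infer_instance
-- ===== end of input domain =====

-- B replaces A's four whole-string any() scans with a single flag-carrying pass with early exit; same result, no speed claim.


-- character-class tests shared by both ports: c in string.ascii_lowercase / ascii_uppercase / digits / punctuation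
def pvIsLower (c : Char) : Bool := "abcdefghijklmnopqrstuvwxyz".toList.contains c
def pvIsUpper (c : Char) : Bool := "ABCDEFGHIJKLMNOPQRSTUVWXYZ".toList.contains c
def pvIsDigit (c : Char) : Bool := "0123456789".toList.contains c
def pvIsPunct (c : Char) : Bool := "!\"#$%&'()*+,-./:;<=>?@[\\]^_`{|}~".toList.contains c

-- ===== PORT A =====
def get_character_pool_size (password : String) : Int :=
  if password = "" then 0
  else
    let pool0 : Int := 0
    let pool1 := if password.toList.any pvIsLower then pool0 + 26 else pool0
    let pool2 := if password.toList.any pvIsUpper then pool1 + 26 else pool1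
    let pool3 := if password.toList.any pvIsDigit then pool2 + 10 else pool2
    let pool4 := if password.toList.any pvIsPunct then pool3 + 32 else pool3
    pool4

-- ===== PORT B =====
-- the for-loop of Source B: four seen-flags, early break once all four are set
def pvPoolLoop : List Char → Bool → Bool → Bool → Bool → Bool × Bool × Bool × Bool
  | [], lo, up, di, pu => (lo, up, di, pu)
  | c :: rest, lo, up, di, pu =>
    let lo := lo || pvIsLower c
    let up := up || pvIsUpper c
    let di := di || pvIsDigit c
    let pu := pu || pvIsPunct c
    if lo && up && di && pu then (lo, up, di, pu)
    else pvPoolLoop rest lo up di pu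

def get_character_pool_size_alt (password : String) : Int :=
  let r := pvPoolLoop password.toList false false false false
  (if r.1 then (26 : Int) else 0) + (if r.2.1 then 26 else 0) +
    (if r.2.2.1 then 10 else 0) + (if r.2.2.2 then 32 else 0)

-- ===== PRECONDITION & SPEC =====
def Spec_get_character_pool_size (password : String) (out : Int) : Prop := out = get_character_pool_size_alt password
instance (password : String) (out : Int) : Decidable (Spec_get_character_pool_size password out) := by unfold Spec_get_character_pool_size; infer_instance

-- ===== CLAIM (what is proved, stated in full; the proofs are below) =====
def Claim_equal_get_character_pool_size : Prop := ∀ (password : String), Dom_get_character_pool_size password → Spec_get_character_pool_size password (get_character_pool_size password)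

-- ===== LEMMAS AND PROOFS =====
theorem pvPoolLoop_eq (l : List Char) : ∀ lo up di pu,
    pvPoolLoop l lo up di pu =
      (lo || l.any pvIsLower, up || l.any pvIsUpper, di || l.any pvIsDigit, pu || l.any pvIsPunct) := by
  induction l with
  | nil => simp [pvPoolLoop]
  | cons c rest ih =>
    intro lo up di pu
    simp only [pvPoolLoop, List.any_cons]
    split
    · rename_i h
      simp only [Bool.and_eq_true] at h
      obtain ⟨⟨⟨h1, h2⟩, h3⟩, h4⟩ := h
      simp [← Bool.or_assoc, h1, h2, h3, h4]
    · rw [ih]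
      simp [Bool.or_assoc]

-- ===== VERDICT (by name: the statement is the Claim_ definition above) =====
theorem get_character_pool_size_spec : Claim_equal_get_character_pool_size := by
  intro password _
  unfold Spec_get_character_pool_size get_character_pool_size get_character_pool_size_alt
  rw [pvPoolLoop_eq]
  by_cases h : password = ""
  · subst h; simp
  · simp only [if_neg h, Bool.false_or]
    by_cases h1 : password.toList.any pvIsLower <;>
      by_cases h2 : password.toList.any pvIsUpper <;>
        by_cases h3 : password.toList.any pvIsDigit <;>
          by_cases h4 : password.toList.any pvIsPunct <;>
            simp [h1, h2, h3, h4]
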